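-- pv_equiv track=rewrite | github.com/Tiagoblima/explainable-punctuation-restoration | punctuation-restoration/blistm/data/build_dataset.py | tokens2labels
-- ===== SOURCE A (Python) =====
-- import string
--
-- id2label = {
--     0: 'O',
--     1: 'I-PERIOD',
--     2: 'I-COMMA'
-- }
--
-- def tokens2labels(tokens, return_labels=True):
--     """
--     Convert text to labels
--     :param return_labels: return labels or ids
--     :param tokens:  list of tokens
--     :return:  list of labels
--     """
--
--     labels = []
--     for i, token in enumerate(tokens):
--         try:
--             if token not in string.punctuation:
--                 labels.append(0)
--             elif token in ['.', '?', '!', ';']: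
--                 labels[-1] = 1
--             elif token == ',':
--                 labels[-1] = 2
--
--         except IndexError:
--             raise ValueError(f"Sentence can't start with punctuation {token}")
--     if return_labels:
--         labels = list(map(lambda item: id2label[item], labels))
--     return labels
-- ===== SOURCE B (Python) =====
-- import string
--
-- id2label = {
--     0: 'O',
--     1: 'I-PERIOD',
--     2: 'I-COMMA'
-- }
--
-- def tokens2labels(tokens, return_labels=True):
--     """Word-centric regrouping: one label slot per word, set by the last
--     matched punctuation in the run of punctuation tokens that follows it."""
--     labels = []
--     n = len(tokens)
--     i = 0
--     # leading run of punctuation(-substring) tokens before the first word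
--     while i < n and tokens[i] in string.punctuation:
--         if tokens[i] in ('.', '?', '!', ';', ','):
--             raise ValueError(f"Sentence can't start with punctuation {tokens[i]}")
--         i += 1
--     while i < n:
--         i += 1  # consume the word
--         slot = 0
--         while i < n and tokens[i] in string.punctuation:
--             t = tokens[i]
--             if t in ('.', '?', '!', ';'):
--                 slot = 1
--             elif t == ',':
--                 slot = 2
--             i += 1
--         labels.append(slot)
--     if return_labels:
--         labels = [id2label[l] for l in labels]
--     return labels
-- ===== Notes on version B (the rewrite author's own statement) =====
-- stated objective: alternative
-- what changed: Replaces A's single append/overwrite pass over a growing labels list (labels[-1] rewritten by each matched punctuation) with a word-centric two-level scan: skip the leading punctuation run, then for each word consume the following punctuation run into one slot variable and emit it once.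
-- outside the precondition, e.g. on tokens2labels(['a', '.'], False): A returns [1], B returns [1]
import Mathlib
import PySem

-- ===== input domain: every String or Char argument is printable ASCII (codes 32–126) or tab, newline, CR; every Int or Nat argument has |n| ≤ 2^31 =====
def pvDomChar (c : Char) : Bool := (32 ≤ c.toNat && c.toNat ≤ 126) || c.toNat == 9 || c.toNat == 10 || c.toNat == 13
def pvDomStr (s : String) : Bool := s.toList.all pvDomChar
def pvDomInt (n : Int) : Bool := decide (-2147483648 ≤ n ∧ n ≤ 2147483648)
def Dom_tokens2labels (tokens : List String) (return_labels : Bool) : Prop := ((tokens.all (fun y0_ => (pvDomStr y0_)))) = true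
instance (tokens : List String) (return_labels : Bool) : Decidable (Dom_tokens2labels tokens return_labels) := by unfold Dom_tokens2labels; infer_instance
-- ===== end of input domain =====

-- B regroups A's running append/overwrite pass into a word-centric scan (one slot per word,
-- set by the following punctuation run); equal return value on Pre_ (alternative decomposition, same cost).

-- string.punctuation
def pvPunct : String := "!\"#$%&'()*+,-./:;<=>?@[\\]^_`{|}~"

-- id2label (total function form of the 3-entry dict; labels only ever hold 0/1/2)
def pvId2label (item : Int) : String :=
  if item = 1 then "I-PERIOD" else if item = 2 then "I-COMMA" else "O"

-- ===== PORT A =====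
-- the loop body; labels[-1] = k becomes labels.dropLast ++ [k] (Python raises on empty labels:
-- those inputs are outside Pre_tokens2labels)
def pvAStep (labels : List Int) (token : String) : List Int :=
  if ¬ (PySem.Str.isIn token pvPunct = true) then labels ++ [0]
  else if token ∈ ([".", "?", "!", ";"] : List String) then labels.dropLast ++ [1]
  else if token = "," then labels.dropLast ++ [2]
  else labels

def tokens2labels (tokens : List String) (return_labels : Bool) : List String :=
  let labels := tokens.foldl pvAStep []
  if return_labels then labels.map pvId2label
  else labels.map PySem.Int.toStr  -- Python returns the raw int list here (not List String): outside Pre_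

-- ===== PORT B =====
-- skip the leading punctuation run (Python B raises ValueError on '.','?','!',';',',' here;
-- those inputs are outside Pre_tokens2labels, the port just advances)
def pvBSkipLead : List String → List String
  | [] => []
  | t :: rest => if PySem.Str.isIn t pvPunct then pvBSkipLead rest else t :: rest

-- inner while: consume the punctuation run after a word, updating the word's slot
def pvBRun : List String → Int → Int × List String
  | [], slot => (slot, [])
  | t :: rest, slot =>
    if PySem.Str.isIn t pvPunct then
      pvBRun rest (if t ∈ ([".", "?", "!", ";"] : List String) then 1
                   else if t = "," then 2 else slot)
    else (slot, t :: rest)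

theorem pvBRun_length_le : ∀ (l : List String) (s : Int), (pvBRun l s).2.length ≤ l.length
  | [], _ => Nat.le_refl _
  | t :: rest, s => by
    simp only [pvBRun]
    split
    · exact Nat.le_succ_of_le (pvBRun_length_le rest _)
    · exact Nat.le_refl _

-- outer while: one slot per word
def pvBWords : List String → List Int
  | [] => []
  | _ :: rest =>
    let p := pvBRun rest 0
    p.1 :: pvBWords p.2
termination_by l => l.length
decreasing_by exact Nat.lt_succ_of_le (pvBRun_length_le rest 0)

def tokens2labels_alt (tokens : List String) (return_labels : Bool) : List String :=
  let labels := pvBWords (pvBSkipLead tokens)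
  if return_labels then labels.map pvId2label
  else labels.map PySem.Int.toStr  -- same forced representation outside Pre_

-- ===== PRECONDITION & SPEC =====
-- Pre_ excludes (a) return_labels = False, where A returns a list of ints, not of strings
-- (no value of the declared List String type), and (b) inputs whose leading run of
-- punctuation-substring tokens contains '.', '?', '!', ';' or ',', where A raises ValueError.
def Pre_tokens2labels (tokens : List String) (return_labels : Bool) : Prop :=
  return_labels = true ∧
  ∀ t ∈ tokens.takeWhile (fun t => PySem.Str.isIn t pvPunct),
    t ∉ ([".", "?", "!", ";", ","] : List String)
instance (tokens : List String) (return_labels : Bool) : Decidable (Pre_tokens2labels tokens return_labels) := by unfold Pre_tokens2labels; infer_instance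

def pvWitness_tokens2labels : List String × Bool := (["(", "hello", ",", "world", "!", "!!"], true)

def Spec_tokens2labels (tokens : List String) (return_labels : Bool) (out : List String) : Prop := out = tokens2labels_alt tokens return_labels
instance (tokens : List String) (return_labels : Bool) (out : List String) : Decidable (Spec_tokens2labels tokens return_labels out) := by unfold Spec_tokens2labels; infer_instance

-- ===== CLAIM (what is proved, stated in full; the proofs are below) =====
def Claim_equal_tokens2labels : Prop := ∀ (tokens : List String) (return_labels : Bool), Dom_tokens2labels tokens return_labels → Pre_tokens2labels tokens return_labels → Spec_tokens2labels tokens return_labels (tokens2labels tokens return_labels)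

-- ===== LEMMAS AND PROOFS =====

-- abbreviation for the normalized membership test simp produces
theorem pvIsIn_str (t : String) :
    PySem.Str.isIn t pvPunct = PySem.Chars.isIn t.toList pvPunct.toList := by
  simp

-- Once a word has produced a slot, A's fold from acc ++ [s] computes what B's run/words pass computes.
theorem pvFold_run : ∀ (l : List String) (acc : List Int) (s : Int),
    l.foldl pvAStep (acc ++ [s]) = acc ++ (pvBRun l s).1 :: pvBWords (pvBRun l s).2
  | [], acc, s => by simp [pvBRun, pvBWords]
  | t :: rest, acc, s => by
    by_cases h : PySem.Chars.isIn t.toList pvPunct.toList = true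
    · by_cases h1 : t ∈ ([".", "?", "!", ";"] : List String)
      · simpa [pvAStep, pvBRun, pvIsIn_str, h, h1, List.dropLast_concat] using pvFold_run rest acc 1
      · by_cases h2 : t = ","
        · simpa [pvAStep, pvBRun, pvIsIn_str, h, h1, h2, List.dropLast_concat] using pvFold_run rest acc 2
        · simpa [pvAStep, pvBRun, pvIsIn_str, h, h1, h2] using pvFold_run rest acc s
    · simp only [List.foldl_cons]
      rw [show pvAStep (acc ++ [s]) t = (acc ++ [s]) ++ [0] by simp [pvAStep, h]]
      rw [pvFold_run rest (acc ++ [s]) 0]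
      simp [pvBRun, h, pvBWords]

-- A's whole loop equals B's skip-then-group pass whenever the leading punctuation run is harmless.
theorem pvFold_eq_words : ∀ (tokens : List String),
    (∀ t ∈ tokens.takeWhile (fun t => PySem.Str.isIn t pvPunct),
      t ∉ ([".", "?", "!", ";", ","] : List String)) →
    tokens.foldl pvAStep [] = pvBWords (pvBSkipLead tokens)
  | [], _ => by simp [pvBSkipLead, pvBWords]
  | t :: rest, hpre => by
    by_cases h : PySem.Chars.isIn t.toList pvPunct.toList = true
    · have hp : PySem.Str.isIn t pvPunct = true := by rw [pvIsIn_str]; exact h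
      have htw := List.takeWhile_cons_of_pos (l := rest)
        (p := fun t => PySem.Str.isIn t pvPunct) hp
      have ht : t ∉ ([".", "?", "!", ";", ","] : List String) := by
        apply hpre; rw [htw]; exact List.mem_cons_self
      have h1 : t ∉ ([".", "?", "!", ";"] : List String) := by
        intro hc; apply ht; simp at hc ⊢; tauto
      have h2 : t ≠ "," := by intro hc; apply ht; simp [hc]
      have hrest : ∀ x ∈ rest.takeWhile (fun t => PySem.Str.isIn t pvPunct),
          x ∉ ([".", "?", "!", ";", ","] : List String) := by
        intro x hx; apply hpre; rw [htw]; exact List.mem_cons_of_mem _ hx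
      rw [show pvBSkipLead (t :: rest) = pvBSkipLead rest by simp [pvBSkipLead, h]]
      simp only [List.foldl_cons]
      rw [show pvAStep [] t = [] by simp [pvAStep, h, h1, h2]]
      exact pvFold_eq_words rest hrest
    · rw [show pvBSkipLead (t :: rest) = t :: rest by simp [pvBSkipLead, h]]
      simp only [List.foldl_cons]
      rw [show pvAStep [] t = [] ++ [0] by simp [pvAStep, h]]
      rw [pvFold_run rest [] 0]
      simp [pvBWords]

-- ===== VERDICT (by name: the statement is the Claim_ definition above) =====
theorem tokens2labels_spec : Claim_equal_tokens2labels := by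
  intro tokens return_labels _ hpre
  obtain ⟨hrl, hlead⟩ := hpre
  unfold Spec_tokens2labels tokens2labels tokens2labels_alt
  rw [hrl, pvFold_eq_words tokens hlead]
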